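-- pv_equiv track=rewrite | github.com/SQ-mheydari/hw-sys-of-touch-robot | OptoFidelity/TPPT/TPPTcommon/Measurement/adb.py | parse_evtest_init_lines
-- ===== SOURCE A (Python) =====
-- def parse_evtest_init_lines(init_lines: list):
--     """
--     Parse minimum and maximum touch coordinate values from init lines.
--     :param init_lines: List of strings.
--     :return: min_x, max_x, min_y, max_y, multitouch.
--     """
--     def parse_value(s):
--         return int(s.split()[-1].strip())
--
--     min_x = None
--     max_x = None
--     min_y = None
--     max_y = None
--     multitouch = False
--
--     for i, line in enumerate(init_lines):
--         if "ABS_MT_POSITION_X" in line or "ABS_X" in line: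
--             min_x = parse_value(init_lines[i + 2])
--             max_x = parse_value(init_lines[i + 3])
--         elif "ABS_MT_POSITION_Y" in line or "ABS_Y" in line:
--             min_y = parse_value(init_lines[i + 2])
--             max_y = parse_value(init_lines[i + 3])
--
--         if "ABS_MT_POSITION_X" in line:
--             multitouch = True
--
--     return min_x, max_x, min_y, max_y, multitouch
-- ===== SOURCE B (Python) =====
-- def parse_evtest_init_lines(init_lines: list):
--     """
--     Parse minimum and maximum touch coordinate values from init lines.
--     Declarative variant: no mutable loop state -- each axis index is found by
--     an early-exit search from the END of the list (first match from the end =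
--     last match), and the values are parsed once at those indices.
--     :param init_lines: List of strings.
--     :return: min_x, max_x, min_y, max_y, multitouch.
--     """
--     def is_x(line):
--         return "ABS_MT_POSITION_X" in line or "ABS_X" in line
--
--     def is_y(line):
--         return "ABS_MT_POSITION_Y" in line or "ABS_Y" in line
--
--     pairs = list(enumerate(init_lines))
--     x_idx = next((i for i, l in reversed(pairs) if is_x(l)), None)
--     y_idx = next((i for i, l in reversed(pairs) if not is_x(l) and is_y(l)), None)
--
--     def bound(idx, off):
--         if idx is None:
--             return None
--         return int(init_lines[idx + off].split()[-1].strip())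
--
--     multitouch = any("ABS_MT_POSITION_X" in l for l in init_lines)
--     return bound(x_idx, 2), bound(x_idx, 3), bound(y_idx, 2), bound(y_idx, 3), multitouch
-- ===== Notes on version B (the rewrite author's own statement) =====
-- stated objective: alternative
-- what changed: A threads mutable last-wins state through one forward loop that parses at every match; B has no loop state at all: it finds each axis's line by an early-exit search from the END of the list (first match from the end = A's last-wins), parses the two values per axis once at those indices, and computes multitouch with a separate any() pass.
import Mathlib
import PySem

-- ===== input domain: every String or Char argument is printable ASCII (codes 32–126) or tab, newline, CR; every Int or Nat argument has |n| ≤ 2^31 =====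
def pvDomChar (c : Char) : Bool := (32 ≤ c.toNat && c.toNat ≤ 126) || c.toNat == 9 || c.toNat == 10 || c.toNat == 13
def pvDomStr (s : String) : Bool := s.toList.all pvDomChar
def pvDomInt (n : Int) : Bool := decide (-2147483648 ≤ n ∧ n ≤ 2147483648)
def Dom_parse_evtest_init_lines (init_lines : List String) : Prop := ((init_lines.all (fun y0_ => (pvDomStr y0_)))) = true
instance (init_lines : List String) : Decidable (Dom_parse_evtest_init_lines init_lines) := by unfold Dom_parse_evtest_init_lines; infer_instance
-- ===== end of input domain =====

-- B replaces A's stateful forward loop by stateless early-exit searches from the END of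
-- the list (first match from the end = A's last-wins) plus one any() pass (alternative
-- decomposition, same cost).

-- ===== PORT A =====
-- shared helpers: the substring tests and parse_value (both Pythons define them)
def pvMatchX (line : String) : Bool :=
  PySem.Str.isIn "ABS_MT_POSITION_X" line || PySem.Str.isIn "ABS_X" line
def pvMatchY (line : String) : Bool :=
  PySem.Str.isIn "ABS_MT_POSITION_Y" line || PySem.Str.isIn "ABS_Y" line
-- parse_value(s) = int(s.split()[-1].strip()); none = IndexError/ValueError
def pvParse? (s : String) : Option Int :=
  (PySem.List.pyGet? (PySem.Str.split₀ s) (-1)).bind (fun t => PySem.Int.ofStr? (PySem.Str.strip t))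
-- parse_value(init_lines[i]); none = any raise
def pvAt? (ls : List String) (i : Int) : Option Int :=
  (PySem.List.pyGet? ls i).bind pvParse?

-- A's loop body; the whole state is in Option: none = an exception was raised
def pvStepA (ls : List String)
    (st : Option (Option Int × Option Int × Option Int × Option Int × Bool))
    (p : Int × String) :
    Option (Option Int × Option Int × Option Int × Option Int × Bool) :=
  st.bind (fun s =>
    let upd :=
      if pvMatchX p.2 then
        (pvAt? ls (p.1 + 2)).bind (fun a =>
          (pvAt? ls (p.1 + 3)).map (fun b => (some a, some b, s.2.2.1, s.2.2.2.1, s.2.2.2.2)))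
      else if pvMatchY p.2 then
        (pvAt? ls (p.1 + 2)).bind (fun a =>
          (pvAt? ls (p.1 + 3)).map (fun b => (s.1, s.2.1, some a, some b, s.2.2.2.2)))
      else some s
    upd.map (fun s' =>
      (s'.1, s'.2.1, s'.2.2.1, s'.2.2.2.1,
        if PySem.Str.isIn "ABS_MT_POSITION_X" p.2 then true else s'.2.2.2.2)))

def parse_evtest_init_lines (init_lines : List String) :
    Option Int × Option Int × Option Int × Option Int × Bool :=
  (((PySem.List.enumerate init_lines 0).foldl (pvStepA init_lines)
      (some (none, none, none, none, false))).getD (none, none, none, none, false))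

-- ===== PORT B =====
-- B: x_idx/y_idx = first match scanning the enumerated pairs from the END (early exit),
-- bound parses once at a recorded index (none when no index; inside Pre_ parsing succeeds),
-- multitouch = any() over the lines.
def pvBound (ls : List String) (idx : Option Int) (off : Int) : Option Int :=
  idx.bind (fun i => pvAt? ls (i + off))

def parse_evtest_init_lines_alt (init_lines : List String) :
    Option Int × Option Int × Option Int × Option Int × Bool :=
  let pairs := PySem.List.enumerate init_lines 0
  let x_idx : Option Int := (pairs.reverse.find? (fun p => pvMatchX p.2)).map (fun p => p.1)
  let y_idx : Option Int :=
    (pairs.reverse.find? (fun p => !pvMatchX p.2 && pvMatchY p.2)).map (fun p => p.1)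
  let multitouch := init_lines.any (fun l => PySem.Str.isIn "ABS_MT_POSITION_X" l)
  (pvBound init_lines x_idx 2, pvBound init_lines x_idx 3,
   pvBound init_lines y_idx 2, pvBound init_lines y_idx 3, multitouch)

-- ===== PRECONDITION & SPEC =====
-- line i exists, its last whitespace-separated token exists and is a valid int literal
def pvLineOk (ls : List String) (i : Int) : Bool :=
  match PySem.List.pyGet? ls i with
  | none => false
  | some s =>
    match PySem.List.pyGet? (PySem.Str.split₀ s) (-1) with
    | none => false
    | some t => (PySem.Int.ofStr? (PySem.Str.strip t)).isSome
-- Pre_ excludes exactly the inputs on which A raises (IndexError/ValueError while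
-- parsing at a matched line); A returns normally on every input satisfying Pre_.
def Pre_parse_evtest_init_lines (init_lines : List String) : Prop :=
  ∀ p ∈ PySem.List.enumerate init_lines 0,
    ((PySem.Str.isIn "ABS_MT_POSITION_X" p.2 || PySem.Str.isIn "ABS_X" p.2) = true →
      pvLineOk init_lines (p.1 + 2) = true ∧ pvLineOk init_lines (p.1 + 3) = true) ∧
    ((PySem.Str.isIn "ABS_MT_POSITION_X" p.2 || PySem.Str.isIn "ABS_X" p.2) = false →
      (PySem.Str.isIn "ABS_MT_POSITION_Y" p.2 || PySem.Str.isIn "ABS_Y" p.2) = true →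
      pvLineOk init_lines (p.1 + 2) = true ∧ pvLineOk init_lines (p.1 + 3) = true)
instance (init_lines : List String) : Decidable (Pre_parse_evtest_init_lines init_lines) := by
  unfold Pre_parse_evtest_init_lines; infer_instance

def pvWitness_parse_evtest_init_lines : List String :=
  ["ABS_X", "filler", "min 0", "max 599"]

def Spec_parse_evtest_init_lines (init_lines : List String)
    (out : Option Int × Option Int × Option Int × Option Int × Bool) : Prop :=
  out = parse_evtest_init_lines_alt init_lines
instance (init_lines : List String)
    (out : Option Int × Option Int × Option Int × Option Int × Bool) :
    Decidable (Spec_parse_evtest_init_lines init_lines out) := by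
  unfold Spec_parse_evtest_init_lines; infer_instance

-- ===== CLAIM (what is proved, stated in full; the proofs are below) =====
def Claim_equal_parse_evtest_init_lines : Prop :=
  ∀ (init_lines : List String), Dom_parse_evtest_init_lines init_lines →
    Pre_parse_evtest_init_lines init_lines →
    Spec_parse_evtest_init_lines init_lines (parse_evtest_init_lines init_lines)

-- ===== LEMMAS AND PROOFS =====

-- parse_value at index i+2 and i+3 succeeds (proof-side abbreviation)
def pvOk (ls : List String) (i : Int) : Prop :=
  (pvAt? ls (i + 2)).isSome = true ∧ (pvAt? ls (i + 3)).isSome = true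

lemma pvLineOk_eq (ls : List String) (i : Int) : pvLineOk ls i = (pvAt? ls i).isSome := by
  unfold pvLineOk pvAt? pvParse?
  cases h : PySem.List.pyGet? ls i with
  | none => simp
  | some s => cases h2 : PySem.List.pyGet? (PySem.Str.split₀ s) (-1) <;> simp [h2]

-- proof-side reference state machine: A's loop with the parsing delayed
def pvStepB (st : Option Int × Option Int × Bool) (p : Int × String) :
    Option Int × Option Int × Bool :=
  if pvMatchX p.2 then
    (some p.1, st.2.1, st.2.2 || PySem.Str.isIn "ABS_MT_POSITION_X" p.2)
  else if pvMatchY p.2 then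
    (st.1, some p.1, st.2.2)
  else st

-- rendering the reference state into A's running state
def pvRender (ls : List String) (st : Option Int × Option Int × Bool) :
    Option Int × Option Int × Option Int × Option Int × Bool :=
  (st.1.bind (fun i => pvAt? ls (i + 2)), st.1.bind (fun i => pvAt? ls (i + 3)),
   st.2.1.bind (fun i => pvAt? ls (i + 2)), st.2.1.bind (fun i => pvAt? ls (i + 3)),
   st.2.2)

lemma pvStepAB (ls : List String) (b : Option Int × Option Int × Bool) (p : Int × String)
    (hx : pvMatchX p.2 = true → pvOk ls p.1)
    (hy : pvMatchX p.2 = false → pvMatchY p.2 = true → pvOk ls p.1) :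
    pvStepA ls (some (pvRender ls b)) p = some (pvRender ls (pvStepB b p)) := by
  by_cases hX : pvMatchX p.2 = true
  · obtain ⟨h2, h3⟩ := hx hX
    obtain ⟨a, ha⟩ := Option.isSome_iff_exists.mp h2
    obtain ⟨c, hc⟩ := Option.isSome_iff_exists.mp h3
    simp [pvStepA, pvStepB, pvRender, hX, ha, hc, Bool.or_comm]
  · have hX' : pvMatchX p.2 = false := by simpa using hX
    have hmt : PySem.Str.isIn "ABS_MT_POSITION_X" p.2 = false := by
      have := hX'; unfold pvMatchX at this
      exact (Bool.or_eq_false_iff.mp this).1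
    by_cases hY : pvMatchY p.2 = true
    · obtain ⟨h2, h3⟩ := hy hX' hY
      obtain ⟨a, ha⟩ := Option.isSome_iff_exists.mp h2
      obtain ⟨c, hc⟩ := Option.isSome_iff_exists.mp h3
      have hmt2 := hmt
      simp at hmt2
      simp [pvStepA, pvStepB, pvRender, hX', hY, hmt2, ha, hc]
    · have hY' : pvMatchY p.2 = false := by simpa using hY
      have hmt2 := hmt
      simp at hmt2
      simp [pvStepA, pvStepB, pvRender, hX', hY', hmt2]

lemma pvFoldAB (ls : List String) (ps : List (Int × String))
    (b : Option Int × Option Int × Bool)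
    (h : ∀ p ∈ ps, (pvMatchX p.2 = true → pvOk ls p.1) ∧
        (pvMatchX p.2 = false → pvMatchY p.2 = true → pvOk ls p.1)) :
    ps.foldl (pvStepA ls) (some (pvRender ls b)) = some (pvRender ls (ps.foldl pvStepB b)) := by
  induction ps generalizing b with
  | nil => rfl
  | cons p ps ih =>
      have hp := h p (List.mem_cons_self)
      have hrest : ∀ q ∈ ps, _ := fun q hq => h q (List.mem_cons_of_mem _ hq)
      simp only [List.foldl_cons, pvStepAB ls b p hp.1 hp.2]
      exact ih _ hrest

-- last-wins overwrite = first match scanning from the end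
lemma pvLastX (ps : List (Int × String)) (b : Option Int × Option Int × Bool) :
    (ps.foldl pvStepB b).1 =
      ((ps.reverse.find? (fun p => pvMatchX p.2)).map (fun p => p.1)).orElse (fun _ => b.1) := by
  induction ps generalizing b with
  | nil => simp
  | cons p ps ih =>
      rw [List.foldl_cons, ih, List.reverse_cons, List.find?_append]
      cases hf : ps.reverse.find? (fun p => pvMatchX p.2) with
      | some q => simp
      | none =>
          by_cases hX : pvMatchX p.2 = true
          · simp [pvStepB, hX]
          · have hX' : pvMatchX p.2 = false := by simpa using hX
            by_cases hY : pvMatchY p.2 = true <;>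
              simp_all [pvStepB]

lemma pvLastY (ps : List (Int × String)) (b : Option Int × Option Int × Bool) :
    (ps.foldl pvStepB b).2.1 =
      ((ps.reverse.find? (fun p => !pvMatchX p.2 && pvMatchY p.2)).map (fun p => p.1)).orElse
        (fun _ => b.2.1) := by
  induction ps generalizing b with
  | nil => simp
  | cons p ps ih =>
      rw [List.foldl_cons, ih, List.reverse_cons, List.find?_append]
      cases hf : ps.reverse.find? (fun p => !pvMatchX p.2 && pvMatchY p.2) with
      | some q => simp
      | none =>
          by_cases hX : pvMatchX p.2 = true
          · simp [pvStepB, hX]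
          · have hX' : pvMatchX p.2 = false := by simpa using hX
            by_cases hY : pvMatchY p.2 = true <;>
              simp_all [pvStepB]

lemma pvLastMT (ps : List (Int × String)) (b : Option Int × Option Int × Bool) :
    (ps.foldl pvStepB b).2.2 =
      (b.2.2 || ps.any (fun p => PySem.Str.isIn "ABS_MT_POSITION_X" p.2)) := by
  induction ps generalizing b with
  | nil => simp
  | cons p ps ih =>
      rw [List.foldl_cons, ih, List.any_cons]
      have hstep : (pvStepB b p).2.2 = (b.2.2 || PySem.Str.isIn "ABS_MT_POSITION_X" p.2) := by
        by_cases hX : pvMatchX p.2 = true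
        · simp [pvStepB, hX]
        · have hX' : pvMatchX p.2 = false := by simpa using hX
          have hmt : PySem.Str.isIn "ABS_MT_POSITION_X" p.2 = false := by
            unfold pvMatchX at hX'
            exact (Bool.or_eq_false_iff.mp hX').1
          rw [hmt, Bool.or_false]
          by_cases hY : pvMatchY p.2 = true <;> simp [pvStepB, hX', hY]
      rw [hstep, Bool.or_assoc]

lemma pvAnyEnum (ls : List String) (s : Int) (f : String → Bool) :
    (PySem.List.enumerate ls s).any (fun p => f p.2) = ls.any f := by
  induction ls generalizing s with
  | nil => simp [PySem.List.enumerate_nil]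
  | cons x xs ih => simp [PySem.List.enumerate_cons, ih]

-- ===== VERDICT (by name: the statement is the Claim_ definition above) =====
theorem parse_evtest_init_lines_spec : Claim_equal_parse_evtest_init_lines := by
  intro ls _ hpre
  unfold Spec_parse_evtest_init_lines
  unfold Pre_parse_evtest_init_lines at hpre
  have hpre' : ∀ p ∈ PySem.List.enumerate ls 0,
      (pvMatchX p.2 = true → pvOk ls p.1) ∧
      (pvMatchX p.2 = false → pvMatchY p.2 = true → pvOk ls p.1) := by
    intro p hp
    obtain ⟨h1, h2⟩ := hpre p hp
    simp only [pvLineOk_eq] at h1 h2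
    exact ⟨fun hX => h1 hX, fun hX hY => h2 hX hY⟩
  have hA : parse_evtest_init_lines ls =
      pvRender ls ((PySem.List.enumerate ls 0).foldl pvStepB (none, none, false)) := by
    unfold parse_evtest_init_lines
    have h0 : (some (none, none, none, none, false) :
        Option (Option Int × Option Int × Option Int × Option Int × Bool)) =
        some (pvRender ls (none, none, false)) := by simp [pvRender]
    rw [h0, pvFoldAB ls _ _ hpre']
    rfl
  set st := (PySem.List.enumerate ls 0).foldl pvStepB (none, none, false) with hst
  have hx := pvLastX (PySem.List.enumerate ls 0) (none, none, false)
  have hy := pvLastY (PySem.List.enumerate ls 0) (none, none, false)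
  have hm := pvLastMT (PySem.List.enumerate ls 0) (none, none, false)
  rw [← hst] at hx hy hm
  have hx' : st.1 = ((PySem.List.enumerate ls 0).reverse.find?
      (fun p => pvMatchX p.2)).map (fun p => p.1) := by
    rw [hx]; cases ((PySem.List.enumerate ls 0).reverse.find? (fun p => pvMatchX p.2)) <;> rfl
  have hy' : st.2.1 = ((PySem.List.enumerate ls 0).reverse.find?
      (fun p => !pvMatchX p.2 && pvMatchY p.2)).map (fun p => p.1) := by
    rw [hy]
    cases ((PySem.List.enumerate ls 0).reverse.find? (fun p => !pvMatchX p.2 && pvMatchY p.2)) <;> rfl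
  have hm' : st.2.2 = ls.any (fun l => PySem.Str.isIn "ABS_MT_POSITION_X" l) := by
    rw [hm, Bool.false_or, pvAnyEnum]
  have hB : parse_evtest_init_lines_alt ls = pvRender ls st := by
    simp only [parse_evtest_init_lines_alt, pvRender, pvBound]
    rw [← hx', ← hy', ← hm']
  rw [hA, hB]
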